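-- pv_equiv track=rewrite | github.com/wallbreaker1900/BME205 | WK0/problem4..py | count
-- ===== SOURCE A (Python) =====
-- def count(s):
--     res = [0, 0, 0, 0]
--     for i in range(0, len(s)):
--         if s[i] == 'A':
--             res[0] += 1
--         elif s[i] == 'C':
--             res[1] += 1
--         elif s[i] == 'G':
--             res[2] += 1
--         else:
--             res[3] += 1
--     return res
-- ===== SOURCE B (Python) =====
-- def count(s):
--     a = s.count('A')
--     c = s.count('C')
--     g = s.count('G')
--     return [a, c, g, len(s) - a - c - g]
-- ===== Notes on version B (the rewrite author's own statement) =====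
-- stated objective: idiomatic
-- what changed: Replaces the index loop with a four-way branch over a mutable result list by three str.count library scans, deriving the fourth bucket by subtraction from len(s).
import Mathlib
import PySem

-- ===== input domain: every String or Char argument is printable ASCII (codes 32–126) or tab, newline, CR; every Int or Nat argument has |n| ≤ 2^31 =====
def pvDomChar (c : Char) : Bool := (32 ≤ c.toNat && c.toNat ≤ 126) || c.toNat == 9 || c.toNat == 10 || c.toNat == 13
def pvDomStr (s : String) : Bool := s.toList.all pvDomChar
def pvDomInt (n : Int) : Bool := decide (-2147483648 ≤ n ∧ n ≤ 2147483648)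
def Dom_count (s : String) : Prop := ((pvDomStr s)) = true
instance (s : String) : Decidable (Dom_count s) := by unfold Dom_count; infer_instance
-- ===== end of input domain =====

-- B replaces A's indexed loop with a four-way branch by three s.count scans plus a subtraction (idiomatic).

-- ===== PORT A =====
-- the loop body: the four-way branch updating res[0..3] in place
def pvStep (res : List Int) (c : Char) : List Int :=
  if c == 'A' then PySem.List.pySetD res 0 (PySem.List.pyGetD res 0 0 + 1)
  else if c == 'C' then PySem.List.pySetD res 1 (PySem.List.pyGetD res 1 0 + 1)
  else if c == 'G' then PySem.List.pySetD res 2 (PySem.List.pyGetD res 2 0 + 1)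
  else PySem.List.pySetD res 3 (PySem.List.pyGetD res 3 0 + 1)

-- literal port of A: for i in range(0, len(s)), branch on s[i], update res
def count (s : String) : List Int :=
  (PySem.List.pyRange 0 (PySem.Str.len s)).foldl
    (fun res i => pvStep res (PySem.List.pyGetD s.toList i ' '))
    [0, 0, 0, 0]

-- ===== PORT B =====
def count_alt (s : String) : List Int :=
  let a : Int := PySem.Str.count s "A"
  let c : Int := PySem.Str.count s "C"
  let g : Int := PySem.Str.count s "G"
  [a, c, g, PySem.Str.len s - a - c - g]

-- ===== PRECONDITION & SPEC =====
def Spec_count (s : String) (out : List Int) : Prop := out = count_alt s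
instance (s : String) (out : List Int) : Decidable (Spec_count s out) := by unfold Spec_count; infer_instance

-- ===== CLAIM (what is proved, stated in full; the proofs are below) =====
def Claim_equal_count : Prop := ∀ (s : String), Dom_count s → Spec_count s (count s)

-- ===== LEMMAS AND PROOFS =====

-- Python str.count of a single character is List.count
theorem chars_count_go_single (c : Char) (l : List Char) (fuel acc : Nat)
    (h : l.length ≤ fuel) :
    PySem.Chars.count.go [c] fuel l acc = acc + l.count c := by
  induction l generalizing fuel acc with
  | nil => cases fuel <;> simp [PySem.Chars.count.go]
  | cons hd t ih =>
    cases fuel with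
    | zero => simp at h
    | succ n =>
      simp only [List.length_cons, Nat.succ_le_succ_iff] at h
      by_cases hc : hd = c
      · subst hc
        simp [PySem.Chars.count.go, List.isPrefixOf, ih n (acc + 1) h, List.count_cons]
        omega
      · simp [PySem.Chars.count.go, List.isPrefixOf, hc, ih n acc h, Ne.symm hc]

theorem chars_count_single (c : Char) (l : List Char) :
    PySem.Chars.count l [c] = l.count c := by
  simp [PySem.Chars.count, chars_count_go_single c l l.length 0 le_rfl]

theorem pvStep_eval (a c g o : Int) (ch : Char) :
    pvStep [a, c, g, o] ch =
      if ch = 'A' then [a + 1, c, g, o]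
      else if ch = 'C' then [a, c + 1, g, o]
      else if ch = 'G' then [a, c, g + 1, o]
      else [a, c, g, o + 1] := by
  unfold pvStep
  split_ifs with h1 h2 h3 <;>
    simp_all [PySem.List.pySetD, PySem.List.pySet?, PySem.List.pyGetD,
      PySem.List.pyGet?, PySem.List.pyIdx?]

def pvNotACG (ch : Char) : Bool := !(ch == 'A' || ch == 'C' || ch == 'G')

theorem pv_counts_add (l : List Char) :
    l.count 'A' + l.count 'C' + l.count 'G' + l.countP pvNotACG = l.length := by
  induction l with
  | nil => rfl
  | cons hd t ih =>
    simp only [List.count_cons, List.countP_cons, List.length_cons]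
    by_cases h1 : hd = 'A' <;> by_cases h2 : hd = 'C' <;> by_cases h3 : hd = 'G' <;>
      simp_all [pvNotACG] <;> omega

theorem pv_loop (l : List Char) (a c g o : Int) :
    l.foldl pvStep [a, c, g, o]
    = [a + l.count 'A', c + l.count 'C', g + l.count 'G', o + l.countP pvNotACG] := by
  induction l generalizing a c g o with
  | nil => simp
  | cons hd t ih =>
    simp only [List.foldl_cons, List.count_cons, List.countP_cons, pvStep_eval]
    by_cases h1 : hd = 'A'
    · subst h1; simp [ih, pvNotACG]; omega
    · by_cases h2 : hd = 'C'
      · subst h2; simp [h1, ih, pvNotACG]; omega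
      · by_cases h3 : hd = 'G'
        · subst h3; simp [h1, h2, ih, pvNotACG]; omega
        · simp [h1, h2, h3, ih, pvNotACG]; omega

-- ===== VERDICT (by name: the statement is the Claim_ definition above) =====
theorem count_spec : Claim_equal_count := by
  intro s _
  unfold Spec_count
  have hB : count_alt s = [((PySem.Str.count s "A" : Nat) : Int), ((PySem.Str.count s "C" : Nat) : Int),
      ((PySem.Str.count s "G" : Nat) : Int),
      PySem.Str.len s - (PySem.Str.count s "A" : Int) - (PySem.Str.count s "C" : Int)
        - (PySem.Str.count s "G" : Int)] := rfl
  have hlen : PySem.Str.len s = PySem.List.len s.toList := rfl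
  have hA : count s = s.toList.foldl pvStep [0, 0, 0, 0] := by
    unfold count
    rw [hlen]
    exact PySem.List.foldl_pyRange_zero_pyGetD s.toList ' ' pvStep [0, 0, 0, 0]
  have h4 := pv_counts_add s.toList
  rw [hA, hB, pv_loop]
  simp only [PySem.Str.count_eq, show ("A".toList = ['A']) from rfl,
    show ("C".toList = ['C']) from rfl, show ("G".toList = ['G']) from rfl,
    chars_count_single, hlen, PySem.List.len_eq, zero_add, List.cons.injEq, and_true]
  refine ⟨trivial, trivial, trivial, ?_⟩
  omega
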